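-- pv_equiv track=rewrite | github.com/loning/mbook-binary | src/binaryuniverse/tests/test_M1_3.py | _encode_fixed_point
-- ===== SOURCE A (Python) =====
-- from typing import Dict, List, Any, Tuple
--
-- def _encode_fixed_point(truth_value: bool, statement: Dict[str, Any],
--                       truth_assignment: Dict[str, Any]) -> str:
--     """编码语义不动点"""
--     # 编码真值
--     truth_bit = '1' if truth_value else '0'
--
--     # 编码语句和真值断言
--     stmt_encoding = statement['encoding']
--     truth_encoding = truth_assignment['encoding']
--
--     # 合并编码
--     fixed_point_encoding = truth_bit + stmt_encoding + truth_encoding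
--
--     # 确保no-11约束
--     while '11' in fixed_point_encoding:
--         fixed_point_encoding = fixed_point_encoding.replace('11', '10')
--
--     return fixed_point_encoding
-- ===== SOURCE B (Python) =====
-- def _encode_fixed_point(truth_value: bool, statement, truth_assignment) -> str:
--     """Encode the semantic fixed point; the no-11 constraint is enforced by rewriting
--     each maximal run of k consecutive '1's to '10'*(k//2) + '1'*(k%2)."""
--     s = ('1' if truth_value else '0') + statement['encoding'] + truth_assignment['encoding']
--     parts = []
--     i, n = 0, len(s)
--     while i < n:
--         if s[i] == '1':
--             j = i
--             while j < n and s[j] == '1':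
--                 j += 1
--             k = j - i
--             parts.append('10' * (k // 2) + '1' * (k % 2))
--             i = j
--         else:
--             parts.append(s[i])
--             i += 1
--     return ''.join(parts)
-- ===== Notes on version B (the rewrite author's own statement) =====
-- stated objective: alternative
-- what changed: The while/str.replace fixpoint loop enforcing the no-11 constraint is replaced by a run-length rewrite: each maximal run of k consecutive '1's is emitted as '10'*(k//2) + '1'*(k%2), other characters are copied unchanged.
-- outside the precondition, e.g. on _encode_fixed_point(True, {}, {'encoding': '0'}): A raises KeyError, B raises KeyError
import Mathlib
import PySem

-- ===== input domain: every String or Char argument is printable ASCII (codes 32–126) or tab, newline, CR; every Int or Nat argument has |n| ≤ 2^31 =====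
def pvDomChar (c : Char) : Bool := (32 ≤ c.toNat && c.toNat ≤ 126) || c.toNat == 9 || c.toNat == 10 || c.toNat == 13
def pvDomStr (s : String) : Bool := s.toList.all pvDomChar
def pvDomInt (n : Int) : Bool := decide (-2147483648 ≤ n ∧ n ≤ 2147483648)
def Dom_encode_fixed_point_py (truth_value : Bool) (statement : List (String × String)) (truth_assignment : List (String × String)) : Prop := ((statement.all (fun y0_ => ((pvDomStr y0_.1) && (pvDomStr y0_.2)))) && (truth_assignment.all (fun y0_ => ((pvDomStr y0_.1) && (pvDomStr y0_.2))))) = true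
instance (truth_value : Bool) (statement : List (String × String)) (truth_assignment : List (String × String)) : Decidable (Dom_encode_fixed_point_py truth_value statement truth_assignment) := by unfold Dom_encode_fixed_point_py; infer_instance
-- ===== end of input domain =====

-- B replaces A's while/str.replace no-11 fixpoint loop by a run-length rewrite of each
-- maximal run of '1's (objective: alternative decomposition).
-- Python raises KeyError when a dict lacks the key 'encoding'; Pre_ excludes exactly those inputs;
-- dict lookup is first-match on the association list (type convention); the `.getD ""` default is never reached inside Pre_.

-- ===== PORT A =====
-- `pyWhile11`'s fuel is a totality guard only: the loop body runs unchanged while '11' is present.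
def pyWhile11 : Nat -> List Char -> List Char
  | 0, l => l
  | fuel+1, l =>
      if PySem.Chars.isIn ['1','1'] l then
        pyWhile11 fuel (PySem.Chars.replace l ['1','1'] ['1','0'])
      else l

def encode_fixed_point_py (truth_value : Bool) (statement : List (String × String)) (truth_assignment : List (String × String)) : String :=
  let truth_bit : List Char := if truth_value then ['1'] else ['0']
  let stmt_encoding : String := (((statement.find? (fun p => p.1 == "encoding")).map (·.2)).getD "")
  let truth_encoding : String := (((truth_assignment.find? (fun p => p.1 == "encoding")).map (·.2)).getD "")
  let fixed_point_encoding : List Char := truth_bit ++ stmt_encoding.toList ++ truth_encoding.toList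
  String.ofList (pyWhile11 (fixed_point_encoding.length + 1) fixed_point_encoding)

-- ===== PORT B =====
-- length of the leading run of '1's (Source B's inner `while j < n and s[j]=='1'` scan)
def leadOnes : List Char -> Nat
  | [] => 0
  | c :: t => if c = '1' then leadOnes t + 1 else 0

-- the rest after the leading run of '1's (Source B's `i = j`)
def dropOnes : List Char -> List Char
  | [] => []
  | c :: t => if c = '1' then dropOnes t else c :: t

lemma dropOnes_length_le (l : List Char) : (dropOnes l).length ≤ l.length := by
  induction l with
  | nil => simp [dropOnes]
  | cons c t ih => by_cases h : c = '1' <;> simp [dropOnes, h] <;> omega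

-- '10' * (k // 2) + '1' * (k % 2)
def emitRun (k : Nat) : List Char :=
  (List.replicate (k / 2) (['1','0'] : List Char)).flatten ++ List.replicate (k % 2) '1'

def fixRuns : List Char -> List Char
  | [] => []
  | c :: t =>
    if c = '1' then emitRun (leadOnes t + 1) ++ fixRuns (dropOnes t)
    else c :: fixRuns t
termination_by l => l.length
decreasing_by
  · have := dropOnes_length_le t; simp; omega
  · simp

def encLookup (d : List (String × String)) : List Char :=
  (((d.find? (fun p => p.1 == "encoding")).map (·.2)).getD "").toList

def encode_fixed_point_py_alt (truth_value : Bool) (statement : List (String × String)) (truth_assignment : List (String × String)) : String :=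
  String.ofList (fixRuns ((if truth_value then '1' else '0') :: (encLookup statement ++ encLookup truth_assignment)))

-- ===== PRECONDITION & SPEC =====
-- Pre_ excludes exactly the inputs on which Python A raises KeyError: a dict without the key "encoding".
def Pre_encode_fixed_point_py (truth_value : Bool) (statement : List (String × String)) (truth_assignment : List (String × String)) : Prop :=
  (statement.find? (fun p => p.1 == "encoding")).isSome = true ∧
  (truth_assignment.find? (fun p => p.1 == "encoding")).isSome = true
instance (truth_value : Bool) (statement : List (String × String)) (truth_assignment : List (String × String)) : Decidable (Pre_encode_fixed_point_py truth_value statement truth_assignment) := by unfold Pre_encode_fixed_point_py; infer_instance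

def pvWitness_encode_fixed_point_py : Bool × (List (String × String)) × (List (String × String)) :=
  (true, [("encoding", "1011")], [("encoding", "01")])

def Spec_encode_fixed_point_py (truth_value : Bool) (statement : List (String × String)) (truth_assignment : List (String × String)) (out : String) : Prop := out = encode_fixed_point_py_alt truth_value statement truth_assignment
instance (truth_value : Bool) (statement : List (String × String)) (truth_assignment : List (String × String)) (out : String) : Decidable (Spec_encode_fixed_point_py truth_value statement truth_assignment out) := by unfold Spec_encode_fixed_point_py; infer_instance

-- ===== CLAIM (what is proved, stated in full; the proofs are below) =====
def Claim_equal_encode_fixed_point_py : Prop := ∀ (truth_value : Bool) (statement : List (String × String)) (truth_assignment : List (String × String)), Dom_encode_fixed_point_py truth_value statement truth_assignment → Pre_encode_fixed_point_py truth_value statement truth_assignment → Spec_encode_fixed_point_py truth_value statement truth_assignment (encode_fixed_point_py truth_value statement truth_assignment)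

-- ===== LEMMAS AND PROOFS =====

-- single non-overlapping left-to-right pass of "11" -> "10" (what one str.replace does)
def pass11 : List Char -> List Char
  | [] => []
  | [c] => [c]
  | c :: d :: t => if c = '1' ∧ d = '1' then '1' :: '0' :: pass11 t else c :: pass11 (d :: t)

def has11 : List Char -> Bool
  | [] => false
  | [_] => false
  | c :: d :: t => (c = '1' && d = '1') || has11 (d :: t)

lemma replace_go_eq_pass11 : ∀ (fuel : Nat) (l acc : List Char), l.length ≤ fuel →
    PySem.Chars.replace.go ['1','1'] ['1','0'] fuel l acc = acc.reverse ++ pass11 l := by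
  intro fuel
  induction fuel with
  | zero =>
    intro l acc h
    have : l = [] := by cases l <;> simp_all
    subst this; simp [PySem.Chars.replace.go, pass11]
  | succ n ih =>
    intro l acc h
    match l with
    | [] => simp [PySem.Chars.replace.go, pass11]
    | [c] =>
      have hp : ¬ (List.isPrefixOf ['1','1'] [c] = true) := by
        simp [List.isPrefixOf]
      simp only [PySem.Chars.replace.go, hp]
      rw [ih [] _ (by simp)]
      simp [pass11]
    | c :: d :: t =>
      simp only [PySem.Chars.replace.go]
      by_cases hp : List.isPrefixOf ['1','1'] (c :: d :: t) = true
      · have hcd : c = '1' ∧ d = '1' := by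
          simp [List.isPrefixOf] at hp
          exact ⟨hp.1.symm, hp.2.symm⟩
        rw [if_pos hp]
        have hdrop : List.drop (['1','1'] : List Char).length (c :: d :: t) = t := rfl
        rw [hdrop, ih t _ (by simp at h ⊢; omega)]
        simp [pass11, hcd.1, hcd.2]
      · have hcd : ¬ (c = '1' ∧ d = '1') := by
          rintro ⟨rfl, rfl⟩; exact hp (by simp [List.isPrefixOf])
        rw [if_neg hp, ih (d :: t) _ (by simp at h ⊢; omega)]
        simp [pass11, hcd]

lemma replace_eq_pass11 (l : List Char) :
    PySem.Chars.replace l ['1','1'] ['1','0'] = pass11 l := by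
  simp only [PySem.Chars.replace]
  rw [if_neg (by simp), replace_go_eq_pass11 l.length l [] le_rfl]
  simp

lemma infix_iff_has11 (l : List Char) : (['1','1'] <:+: l) ↔ has11 l = true := by
  induction l with
  | nil => simp [has11]
  | cons c t ih =>
    match t with
    | [] =>
      simp only [has11]
      constructor
      · intro hinf
        have := hinf.length_le
        simp at this
      · intro h; simp at h
    | d :: t' =>
      rw [List.infix_cons_iff, ih]
      simp only [has11]
      constructor
      · rintro (hpre | hinf)
        · simp only [List.cons_prefix_cons] at hpre
          obtain ⟨h1, h2, -⟩ := hpre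
          simp [h1.symm, h2.symm]
        · simp [hinf]
      · intro h
        rcases Bool.or_eq_true_iff.mp h with h1 | h2
        · left
          simp only [Bool.and_eq_true, decide_eq_true_eq] at h1
          simp [List.cons_prefix_cons, h1.1, h1.2]
        · exact Or.inr h2

lemma has11_cons_of_ne {c : Char} (x : List Char) (hc : c ≠ '1') : has11 (c :: x) = has11 x := by
  cases x <;> simp [has11, hc]

lemma pass11_cons (c : Char) (t : List Char) : ∃ u, pass11 (c :: t) = c :: u := by
  match t with
  | [] => exact ⟨[], rfl⟩
  | d :: t' =>
    by_cases h : c = '1' ∧ d = '1'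
    · exact ⟨'0' :: pass11 t', by simp [pass11, h]⟩
    · exact ⟨pass11 (d :: t'), by simp [pass11, h]⟩

lemma has11_pass11 (l : List Char) : has11 (pass11 l) = false := by
  induction l using pass11.induct with
  | case1 => simp [pass11, has11]
  | case2 c => simp [pass11, has11]
  | case3 c d t h ih =>
    obtain ⟨rfl, rfl⟩ := h
    have e : pass11 ('1' :: '1' :: t) = '1' :: '0' :: pass11 t := by simp [pass11]
    have e2 : has11 ('1' :: '0' :: pass11 t) = has11 ('0' :: pass11 t) := by simp [has11]
    rw [e, e2, has11_cons_of_ne _ (by decide)]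
    exact ih
  | case4 c d t h ih =>
    simp only [pass11, if_neg h]
    by_cases hc : c = '1'
    · subst hc
      have hd : d ≠ '1' := fun hd => h ⟨rfl, hd⟩
      obtain ⟨u, hu⟩ := pass11_cons d t
      rw [hu]
      simp only [has11]
      rw [← hu, ih]
      simp [hd]
    · rw [has11_cons_of_ne _ hc]
      exact ih

lemma pass11_of_not_has11 (l : List Char) (h : has11 l = false) : pass11 l = l := by
  induction l using pass11.induct with
  | case1 => rfl
  | case2 c => rfl
  | case3 c d t hcd ih =>
    exfalso
    obtain ⟨rfl, rfl⟩ := hcd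
    simp [has11] at h
  | case4 c d t hcd ih =>
    simp only [has11, Bool.or_eq_false_iff] at h
    rw [pass11, if_neg hcd, ih h.2]

lemma emitRun_add_two (m : Nat) : emitRun (m + 2) = '1' :: '0' :: emitRun m := by
  have h1 : (m + 2) / 2 = m / 2 + 1 := by omega
  have h2 : (m + 2) % 2 = m % 2 := by omega
  simp [emitRun, h1, h2, List.replicate_succ]

-- peeling the leading run: fixRuns l = emitRun (leadOnes l) ++ fixRuns (dropOnes l)
lemma fixRuns_peel (l : List Char) :
    fixRuns l = emitRun (leadOnes l) ++ fixRuns (dropOnes l) := by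
  match l with
  | [] => simp [fixRuns, leadOnes, dropOnes, emitRun]
  | c :: t =>
    by_cases h : c = '1'
    · subst h
      rw [fixRuns]
      simp [leadOnes, dropOnes]
    · simp [leadOnes, dropOnes, h, emitRun]

lemma fixRuns_eq_pass11 (l : List Char) : fixRuns l = pass11 l := by
  induction l using pass11.induct with
  | case1 => simp [fixRuns, pass11]
  | case2 c =>
    by_cases h : c = '1'
    · subst h; simp [fixRuns, leadOnes, dropOnes, emitRun, pass11]
    · simp [fixRuns, pass11, h]
  | case3 c d t h ih =>
    obtain ⟨rfl, rfl⟩ := h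
    rw [fixRuns]
    simp only [if_pos rfl]
    have hl : leadOnes ('1' :: t) + 1 = leadOnes t + 2 := by simp [leadOnes]
    have hd : dropOnes ('1' :: t) = dropOnes t := by simp [dropOnes]
    rw [hl, hd, emitRun_add_two]
    have : emitRun (leadOnes t) ++ fixRuns (dropOnes t) = fixRuns t := (fixRuns_peel t).symm
    simp only [List.cons_append, this, ih]
    simp [pass11]
  | case4 c d t h ih =>
    by_cases hc : c = '1'
    · subst hc
      have hd : d ≠ '1' := fun hd => h ⟨rfl, hd⟩
      rw [fixRuns]
      simp only [if_pos rfl]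
      have hl : leadOnes (d :: t) = 0 := by simp [leadOnes, hd]
      have hdr : dropOnes (d :: t) = d :: t := by simp [dropOnes, hd]
      rw [hl, hdr, ih]
      simp [emitRun, pass11, hd]
    · rw [fixRuns]
      simp only [if_neg hc]
      rw [ih, pass11, if_neg h]

lemma pyWhile11_eq_pass11 (s : List Char) :
    pyWhile11 (s.length + 1) s = pass11 s := by
  by_cases h : PySem.Chars.isIn ['1','1'] s = true
  · have hlen : 2 ≤ s.length := by
      have h2 := ((PySem.Chars.isIn_iff_infix _ _).mp h).length_le
      simpa using h2
    obtain ⟨m, hm⟩ : ∃ m, s.length = m + 2 := ⟨s.length - 2, by omega⟩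
    rw [hm]
    show pyWhile11 (m + 2 + 1) s = pass11 s
    simp only [pyWhile11, h, if_true, replace_eq_pass11]
    have hno : ¬ (PySem.Chars.isIn ['1','1'] (pass11 s) = true) := by
      rw [PySem.Chars.isIn_iff_infix, infix_iff_has11, has11_pass11]
      simp
    simp [hno]
  · have h' : has11 s = false := by
      by_contra hc
      simp only [Bool.not_eq_false] at hc
      exact h (by rw [PySem.Chars.isIn_iff_infix, infix_iff_has11]; exact hc)
    rw [pass11_of_not_has11 s h']
    simp [pyWhile11, h]

-- ===== VERDICT (by name: the statement is the Claim_ definition above) =====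
theorem encode_fixed_point_py_spec : Claim_equal_encode_fixed_point_py := by
  intro tv st ta _ _
  unfold Spec_encode_fixed_point_py encode_fixed_point_py encode_fixed_point_py_alt
  simp only [pyWhile11_eq_pass11, ← fixRuns_eq_pass11, encLookup]
  cases tv <;> simp
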